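-- pv_equiv track=rewrite | github.com/eliottcassidy2000/math | 04-computation/recurrence_overview_fast.py | conflict_graph
-- ===== SOURCE A (Python) =====
-- def conflict_graph(cycles):
--     cl = list(cycles)
--     nc = len(cl)
--     vs = [set(c) for c in cl]
--     adj = [[0]*nc for _ in range(nc)]
--     for i in range(nc):
--         for j in range(i+1, nc):
--             if vs[i] & vs[j]:
--                 adj[i][j] = adj[j][i] = 1
--     return adj, cl
-- ===== SOURCE B (Python) =====
-- def conflict_graph(cycles):
--     cl = list(cycles)
--     nc = len(cl)
--     # inverted index: vertex -> sorted list of cycle indices containing it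
--     index = {}
--     for i, c in enumerate(cl):
--         for v in c:
--             ids = index.setdefault(v, [])
--             if not ids or ids[-1] != i:
--                 ids.append(i)
--     # mark every pair of cycles that share some vertex
--     pairs = set()
--     for ids in index.values():
--         for a in range(len(ids)):
--             for b in range(a + 1, len(ids)):
--                 pairs.add((ids[a], ids[b]))
--     adj = [[1 if (i, j) in pairs or (j, i) in pairs else 0 for j in range(nc)]
--            for i in range(nc)]
--     return adj, cl
-- ===== Notes on version B (the rewrite author's own statement) =====
-- stated objective: alternative
-- what changed: A tests every pair of cycles with a set intersection; B builds an inverted index (vertex -> sorted list of cycle indices), collects the conflicting pairs only from cycles that actually share a vertex, and fills the matrix by pair lookups.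
import Mathlib
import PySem

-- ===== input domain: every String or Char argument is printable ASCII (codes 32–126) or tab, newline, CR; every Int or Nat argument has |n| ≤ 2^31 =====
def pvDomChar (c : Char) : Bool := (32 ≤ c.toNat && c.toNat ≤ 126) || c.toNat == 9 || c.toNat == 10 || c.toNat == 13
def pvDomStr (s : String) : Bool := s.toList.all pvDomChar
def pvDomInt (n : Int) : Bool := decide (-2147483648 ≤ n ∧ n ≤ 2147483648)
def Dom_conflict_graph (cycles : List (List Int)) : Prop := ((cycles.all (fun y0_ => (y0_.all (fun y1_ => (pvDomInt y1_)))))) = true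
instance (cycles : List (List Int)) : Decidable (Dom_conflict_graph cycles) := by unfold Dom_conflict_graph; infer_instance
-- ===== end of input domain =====

-- B replaces A's all-pairs set-intersection scan by an inverted index (vertex → cycles containing it)
-- and marks only the pairs that actually share a vertex; same return value, different algorithm.


-- ===== PORT A =====
-- adj[i][j] = v for indices produced by range(nc), hence 0 ≤ i,j < nc: plain Nat List.set is exact here
def pvSet2 (m : List (List Int)) (i j : Nat) (v : Int) : List (List Int) :=
  m.set i ((m.getD i []).set j v)

def conflict_graph (cycles : List (List Int)) : List (List Int) × List (List Int) :=
  let cl := cycles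
  let nc := cl.length
  let vs := cl.map (fun c => PySem.Set.ofList c)
  -- adj = [[0]*nc for _ in range(nc)]
  let adj : List (List Int) := (List.range nc).map (fun _ => List.replicate nc (0 : Int))
  -- for i in range(nc): for j in range(i+1, nc): …  (both bounds are nonnegative, so Nat ranges are exact)
  let adj := (List.range nc).foldl (fun adj i =>
    (List.range' (i+1) (nc - (i+1))).foldl (fun adj j =>
      if PySem.Set.inter (vs.getD i []) (vs.getD j []) ≠ [] then
        pvSet2 (pvSet2 adj i j 1) j i 1
      else adj) adj) adj
  (adj, cl)

-- ===== PORT B =====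
-- index.setdefault(v, []) followed by a conditional append: net effect is one conditional insert
-- ('not ids or ids[-1] != i'  ⇔  ids.getLast? ≠ some i, written with the short-circuit spelled out)
def pvCgIndex (cl : List (List Int)) : PySem.Dict Int (List Int) :=
  (PySem.List.enumerate cl 0).foldl (fun d p =>
    p.2.foldl (fun d v =>
      let ids := d.getD v []
      if ids = [] ∨ ids.getLast? ≠ some p.1 then d.insert v (ids ++ [p.1]) else d) d)
    PySem.Dict.empty

-- pairs = set(); for ids in index.values(): for a in range(len(ids)): for b in range(a+1, len(ids)): pairs.add(…)
-- (ids[a], ids[b] are in range since a,b < len(ids): getD is exact here)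
def pvCgPairs (cl : List (List Int)) : PySem.Set (Int × Int) :=
  (pvCgIndex cl).values.foldl (fun s ids =>
    (List.range ids.length).foldl (fun s a =>
      (List.range' (a+1) (ids.length - (a+1))).foldl (fun s b =>
        PySem.Set.add s (ids.getD a 0, ids.getD b 0)) s) s)
    PySem.Set.empty

def conflict_graph_alt (cycles : List (List Int)) : List (List Int) × List (List Int) :=
  let cl := cycles
  let nc := cl.length
  let pairs := pvCgPairs cl
  let adj := (List.range nc).map (fun (i : Nat) => (List.range nc).map (fun (j : Nat) =>
    if pairs.contains ((i : Int), (j : Int)) || pairs.contains ((j : Int), (i : Int)) then (1 : Int) else 0))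
  (adj, cl)

-- ===== PRECONDITION & SPEC =====
def Spec_conflict_graph (cycles : List (List Int)) (out : List (List Int) × List (List Int)) : Prop := out = conflict_graph_alt cycles
instance (cycles : List (List Int)) (out : List (List Int) × List (List Int)) : Decidable (Spec_conflict_graph cycles out) := by unfold Spec_conflict_graph; infer_instance

-- ===== CLAIM (what is proved, stated in full; the proofs are below) =====
def Claim_equal_conflict_graph : Prop := ∀ (cycles : List (List Int)), Dom_conflict_graph cycles → Spec_conflict_graph cycles (conflict_graph cycles)

-- ===== LEMMAS AND PROOFS =====

-- 'cycles i and j share a vertex'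
def shareB (cl : List (List Int)) (i j : Nat) : Bool :=
  (cl.getD i []).any (fun v => (cl.getD j []).contains v)

-- the common target matrix both ports compute
def tgt (cl : List (List Int)) : List (List Int) :=
  (List.range cl.length).map (fun i => (List.range cl.length).map (fun j =>
    if i ≠ j ∧ shareB cl i j then (1 : Int) else 0))

def entry (m : List (List Int)) (p q : Nat) : Int := (m.getD p []).getD q 0

lemma shareB_iff (cl : List (List Int)) (i j : Nat) :
    shareB cl i j = true ↔ ∃ v, v ∈ cl.getD i [] ∧ v ∈ cl.getD j [] := by
  simp [shareB, List.any_eq_true]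

lemma shareB_symm (cl : List (List Int)) (i j : Nat) : shareB cl i j = shareB cl j i := by
  rw [Bool.eq_iff_iff, shareB_iff, shareB_iff]
  exact ⟨fun ⟨v, h1, h2⟩ => ⟨v, h2, h1⟩, fun ⟨v, h1, h2⟩ => ⟨v, h2, h1⟩⟩

lemma foldl_foldl_flatMap {σ α β : Type} (L : List α) (g : α → List β) (f : σ → α → β → σ)
    (init : σ) :
    L.foldl (fun s i => (g i).foldl (fun s j => f s i j) s) init
      = (L.flatMap (fun i => (g i).map (fun j => (i, j)))).foldl (fun s p => f s p.1 p.2) init := by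
  induction L generalizing init with
  | nil => rfl
  | cons x xs ih => simp [List.foldl_append, List.foldl_map, ih]

lemma getD_set {α : Type} (l : List α) (i n : Nat) (a d : α) :
    (l.set i a).getD n d = if i = n ∧ i < l.length then a else l.getD n d := by
  simp only [List.getD_eq_getElem?_getD, List.getElem?_set]
  split_ifs with h1 h2 h3 h4 <;> simp_all <;> omega

lemma getD_map_lt {α β : Type} (f : α → β) (l : List α) (i : Nat) (h : i < l.length)
    (d : α) (d' : β) : (l.map f).getD i d' = f (l.getD i d) := by
  simp [List.getD_eq_getElem?_getD, List.getElem?_eq_getElem h]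

lemma getD_mem_of_lt {α : Type} (l : List α) (i : Nat) (h : i < l.length) (d : α) :
    l.getD i d ∈ l := by
  rw [List.getD_eq_getElem?_getD, List.getElem?_eq_getElem h]
  exact List.getElem_mem h

lemma getD_lt_eq {α : Type} (l : List α) (i : Nat) (h : i < l.length) (d : α) :
    l.getD i d = l[i] := by
  rw [List.getD_eq_getElem?_getD, List.getElem?_eq_getElem h]; rfl

-- the pairs the triangular double loops range over
lemma mem_pairlist (nc : Nat) (pr : Nat × Nat) :
    pr ∈ (List.range nc).flatMap (fun i => (List.range' (i+1) (nc - (i+1))).map (fun j => (i, j)))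
      ↔ pr.1 < pr.2 ∧ pr.2 < nc := by
  rcases pr with ⟨a, b⟩
  constructor
  · intro h
    rcases List.mem_flatMap.mp h with ⟨i, hi, hmem⟩
    rcases List.mem_map.mp hmem with ⟨j, hj, heq⟩
    rw [Prod.mk.injEq] at heq
    obtain ⟨rfl, rfl⟩ := heq
    have hi' := List.mem_range.mp hi
    have hj' := List.mem_range'_1.mp hj
    constructor <;> omega
  · rintro ⟨h1, h2⟩
    exact List.mem_flatMap.mpr ⟨a, List.mem_range.mpr (by omega),
      List.mem_map.mpr ⟨b, List.mem_range'_1.mpr (by omega), rfl⟩⟩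

-- ----- A side -----

lemma length_pvSet2 (m : List (List Int)) (i j : Nat) (v : Int) :
    (pvSet2 m i j v).length = m.length := by simp [pvSet2]

lemma rows_pvSet2 (m : List (List Int)) (i j : Nat) (v : Int) (nc : Nat)
    (h : ∀ r ∈ m, r.length = nc) (hi : i < m.length) :
    ∀ r ∈ pvSet2 m i j v, r.length = nc := by
  intro r hr
  rcases List.mem_or_eq_of_mem_set hr with h' | h'
  · exact h r h'
  · subst h'; rw [List.length_set]; exact h _ (getD_mem_of_lt m i hi [])

lemma entry_pvSet2 (m : List (List Int)) (nc i j p q : Nat) (v : Int)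
    (hlen : m.length = nc) (hrow : ∀ r ∈ m, r.length = nc) (hi : i < nc) (hj : j < nc) :
    entry (pvSet2 m i j v) p q = if p = i ∧ q = j then v else entry m p q := by
  have hrl : (m.getD i []).length = nc := hrow _ (getD_mem_of_lt m i (by omega) [])
  simp only [entry, pvSet2]
  rw [getD_set]
  by_cases hpi : i = p
  · rw [if_pos ⟨hpi, by omega⟩, getD_set]
    by_cases hqj : j = q
    · rw [if_pos ⟨hqj, by omega⟩, if_pos ⟨hpi.symm, hqj.symm⟩]
    · rw [if_neg (by tauto), if_neg (by tauto), hpi]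
  · rw [if_neg (by tauto), if_neg (by tauto)]

-- entries of the A-side double loop, by induction over the flattened pair list
lemma foldA (nc : Nat) (cond : Nat × Nat → Prop) [DecidablePred cond] :
    ∀ (P : List (Nat × Nat)) (m : List (List Int)),
      (∀ pr ∈ P, pr.1 < nc ∧ pr.2 < nc) →
      m.length = nc → (∀ r ∈ m, r.length = nc) →
      (P.foldl (fun m pr => if cond pr then pvSet2 (pvSet2 m pr.1 pr.2 1) pr.2 pr.1 1 else m) m).length = nc ∧
      (∀ r ∈ P.foldl (fun m pr => if cond pr then pvSet2 (pvSet2 m pr.1 pr.2 1) pr.2 pr.1 1 else m) m, r.length = nc) ∧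
      ∀ p q, p < nc → q < nc →
        entry (P.foldl (fun m pr => if cond pr then pvSet2 (pvSet2 m pr.1 pr.2 1) pr.2 pr.1 1 else m) m) p q
          = if (∃ pr ∈ P, cond pr ∧ ((p, q) = pr ∨ (q, p) = pr)) then 1 else entry m p q := by
  intro P
  induction P with
  | nil => intro m _ h1 h2; simpa using ⟨h1, h2⟩
  | cons pr P ih =>
    rcases pr with ⟨a, b⟩
    intro m hP hlen hrow
    have ha : a < nc := (hP (a, b) (by simp)).1
    have hb : b < nc := (hP (a, b) (by simp)).2
    set m' : List (List Int) := if cond (a, b) then pvSet2 (pvSet2 m a b 1) b a 1 else m with hm'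
    have hlen2 : (pvSet2 m a b 1).length = nc := by rw [length_pvSet2]; exact hlen
    have hrow2 : ∀ r ∈ pvSet2 m a b 1, r.length = nc := rows_pvSet2 m _ _ _ nc hrow (by omega)
    have hlen' : m'.length = nc := by
      rw [hm']; split_ifs
      · rw [length_pvSet2]; exact hlen2
      · exact hlen
    have hrow' : ∀ r ∈ m', r.length = nc := by
      rw [hm']; split_ifs
      · exact rows_pvSet2 _ _ _ _ nc hrow2 (by rw [length_pvSet2]; omega)
      · exact hrow
    have hstep : ∀ p q, p < nc → q < nc →
        entry m' p q = if cond (a, b) ∧ ((p, q) = (a, b) ∨ (q, p) = (a, b)) then 1 else entry m p q := by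
      intro p q hp hq
      rw [hm']
      by_cases hc : cond (a, b)
      · rw [if_pos hc,
          entry_pvSet2 _ nc _ _ _ _ _ hlen2 hrow2 hb ha,
          entry_pvSet2 _ nc _ _ _ _ _ hlen hrow ha hb]
        simp only [Prod.mk.injEq]
        by_cases h1 : p = b ∧ q = a
        · rw [if_pos h1, if_pos ⟨hc, Or.inr ⟨h1.2, h1.1⟩⟩]
        · rw [if_neg h1]
          by_cases h2 : p = a ∧ q = b
          · rw [if_pos h2, if_pos ⟨hc, Or.inl h2⟩]
          · rw [if_neg h2, if_neg (by tauto)]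
      · rw [if_neg hc, if_neg (by tauto)]
    obtain ⟨ihl, ihr, ihent⟩ := ih m' (fun x hx => hP x (by simp [hx])) hlen' hrow'
    refine ⟨?_, ?_, ?_⟩
    · simpa only [List.foldl_cons, ← hm'] using ihl
    · simpa only [List.foldl_cons, ← hm'] using ihr
    · intro p q hp hq
      have hmain := ihent p q hp hq
      simp only [List.foldl_cons]
      rw [← hm', hmain, hstep p q hp hq]
      by_cases hE : ∃ x ∈ P, cond x ∧ ((p, q) = x ∨ (q, p) = x)
      · rw [if_pos hE, if_pos (by rcases hE with ⟨x, hx, h⟩; exact ⟨x, by simp [hx], h⟩)]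
      · rw [if_neg hE]
        by_cases hf : cond (a, b) ∧ ((p, q) = (a, b) ∨ (q, p) = (a, b))
        · rw [if_pos hf, if_pos ⟨(a, b), by simp, hf⟩]
        · rw [if_neg hf, if_neg ?_]
          rintro ⟨x, hx, h⟩
          rcases List.mem_cons.mp hx with rfl | hx'
          · exact hf h
          · exact hE ⟨x, hx', h⟩

-- a matrix with the right dimensions and entries IS the target-style map of maps
lemma matrix_eq (M : List (List Int)) (nc : Nat) (f : Nat → Nat → Int)
    (h1 : M.length = nc) (h2 : ∀ r ∈ M, r.length = nc)
    (h3 : ∀ p q, p < nc → q < nc → entry M p q = f p q) :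
    M = (List.range nc).map (fun i => (List.range nc).map (fun j => f i j)) := by
  apply List.ext_getElem
  · simp [h1]
  · intro i hi hi'
    have hinc : i < nc := by simpa [h1] using hi
    have hri : M[i].length = nc := h2 _ (List.getElem_mem hi)
    apply List.ext_getElem
    · simp [hri]
    · intro j hj hj'
      have hjnc : j < nc := by simpa [hri] using hj
      have h := h3 i j hinc hjnc
      simp only [entry, List.getD_eq_getElem?_getD, List.getElem?_eq_getElem hi,
        Option.getD_some] at h
      rw [List.getElem?_eq_getElem (by omega : j < M[i].length)] at h
      simp only [Option.getD_some] at h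
      simpa using h

lemma condA_iff (cl : List (List Int)) (i j : Nat) :
    PySem.Set.inter (PySem.Set.ofList (cl.getD i [])) (PySem.Set.ofList (cl.getD j [])) ≠ []
      ↔ shareB cl i j = true := by
  rw [Ne, List.eq_nil_iff_forall_not_mem, shareB_iff]
  constructor
  · intro h
    by_contra hn
    apply h
    intro v hv
    rw [PySem.Set.mem_inter, PySem.Set.mem_ofList, PySem.Set.mem_ofList] at hv
    exact hn ⟨v, hv⟩
  · rintro ⟨v, h1, h2⟩ h
    exact h v (by rw [PySem.Set.mem_inter, PySem.Set.mem_ofList, PySem.Set.mem_ofList]; exact ⟨h1, h2⟩)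

-- A computes the target matrix
lemma A_eq_tgt (cycles : List (List Int)) : conflict_graph cycles = (tgt cycles, cycles) := by
  simp only [conflict_graph, tgt, Prod.mk.injEq, and_true]
  rw [foldl_foldl_flatMap]
  have hP : ∀ pr ∈ (List.range cycles.length).flatMap
      (fun i => (List.range' (i+1) (cycles.length - (i+1))).map (fun j => (i, j))),
      pr.1 < cycles.length ∧ pr.2 < cycles.length := by
    intro pr hpr
    have := (mem_pairlist cycles.length pr).mp hpr
    omega
  have hlen0 : ((List.range cycles.length).map
      (fun _ => List.replicate cycles.length (0 : Int))).length = cycles.length := by simp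
  have hrow0 : ∀ r ∈ (List.range cycles.length).map
      (fun _ => List.replicate cycles.length (0 : Int)), r.length = cycles.length := by
    intro r hr
    rcases List.mem_map.mp hr with ⟨i, _, rfl⟩
    simp
  obtain ⟨h1, h2, h3⟩ := foldA cycles.length
    (fun pr => PySem.Set.inter ((cycles.map (fun c => PySem.Set.ofList c)).getD pr.1 [])
      ((cycles.map (fun c => PySem.Set.ofList c)).getD pr.2 []) ≠ []) _ _ hP hlen0 hrow0
  refine matrix_eq _ cycles.length _ h1 h2 ?_
  intro p q hp hq
  rw [h3 p q hp hq]
  have hzero : entry ((List.range cycles.length).map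
      (fun _ => List.replicate cycles.length (0 : Int))) p q = 0 := by
    rw [entry, getD_map_lt _ _ p (by simpa using hp) 0]
    simp only [List.getD_eq_getElem?_getD, List.getElem?_replicate]
    split_ifs <;> rfl
  rw [hzero]
  have hcond : ∀ a b : Nat, a < cycles.length → b < cycles.length →
      ((PySem.Set.inter ((cycles.map (fun c => PySem.Set.ofList c)).getD a [])
        ((cycles.map (fun c => PySem.Set.ofList c)).getD b []) ≠ []) ↔ shareB cycles a b = true) := by
    intro a b hA hB
    rw [getD_map_lt _ _ a hA [], getD_map_lt _ _ b hB []]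
    exact condA_iff cycles a b
  have hiff : (∃ pr ∈ (List.range cycles.length).flatMap
      (fun i => (List.range' (i+1) (cycles.length - (i+1))).map (fun j => (i, j))),
      (PySem.Set.inter ((cycles.map (fun c => PySem.Set.ofList c)).getD pr.1 [])
        ((cycles.map (fun c => PySem.Set.ofList c)).getD pr.2 []) ≠ []) ∧
      ((p, q) = pr ∨ (q, p) = pr))
      ↔ (p ≠ q ∧ shareB cycles p q = true) := by
    constructor
    · rintro ⟨⟨a, b⟩, hmem, hc, hor⟩
      have hab := (mem_pairlist cycles.length (a, b)).mp hmem
      have hsh := (hcond a b (by omega) (by omega)).mp hc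
      rcases hor with h | h <;> rw [Prod.mk.injEq] at h <;> obtain ⟨rfl, rfl⟩ := h
      · exact ⟨by omega, hsh⟩
      · exact ⟨by omega, by rw [shareB_symm]; exact hsh⟩
    · rintro ⟨hne, hsh⟩
      rcases Nat.lt_or_ge p q with hlt | hge
      · exact ⟨(p, q), (mem_pairlist cycles.length (p, q)).mpr ⟨hlt, hq⟩,
          (hcond p q hp hq).mpr hsh, Or.inl rfl⟩
      · have hlt : q < p := by omega
        exact ⟨(q, p), (mem_pairlist cycles.length (q, p)).mpr ⟨hlt, hp⟩,
          (hcond q p hq hp).mpr (by rw [shareB_symm]; exact hsh), Or.inr rfl⟩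
  exact if_congr hiff rfl rfl

-- ----- B side -----

-- the list of (indices of) cycles containing vertex v, in increasing order
def idsOf (cl : List (List Int)) (v : Int) : List Int :=
  ((PySem.List.enumerate cl 0).filter (fun p => p.2.contains v)).map (fun p => p.1)

-- one cycle of the index-building loop appends the cycle's index to every vertex it contains, once
lemma innerB (s : Int) (c : List Int) :
    ∀ (d : PySem.Dict Int (List Int)),
      (∀ v, ((d.getD v []).getLast? = some s ∨ ∀ x ∈ d.getD v [], x ≠ s)) →
      ∀ v, (c.foldl (fun d v =>
          if d.getD v [] = [] ∨ (d.getD v []).getLast? ≠ some s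
          then d.insert v (d.getD v [] ++ [s]) else d) d).getD v []
        = d.getD v [] ++ (if v ∈ c ∧ (d.getD v []).getLast? ≠ some s then [s] else []) := by
  induction c with
  | nil => intro d H v; simp
  | cons w c ih =>
    intro d H v
    simp only [List.foldl_cons]
    by_cases hG : (d.getD w []).getLast? ≠ some s
    · have hguard : d.getD w [] = [] ∨ (d.getD w []).getLast? ≠ some s := Or.inr hG
      rw [if_pos hguard]
      set d₁ := d.insert w (d.getD w [] ++ [s]) with hd₁
      have hgw : d₁.getD w [] = d.getD w [] ++ [s] := PySem.Dict.getD_insert_self d w _ []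
      have hgo : ∀ u, u ≠ w → d₁.getD u [] = d.getD u [] := by
        intro u hu; exact PySem.Dict.getD_insert_of_ne d _ [] hu
      have H₁ : ∀ u, ((d₁.getD u []).getLast? = some s ∨ ∀ x ∈ d₁.getD u [], x ≠ s) := by
        intro u
        by_cases hu : u = w
        · subst hu; rw [hgw]; left; exact List.getLast?_concat
        · rw [hgo u hu]; exact H u
      rw [ih d₁ H₁ v]
      by_cases hv : v = w
      · subst hv
        rw [hgw]
        rw [if_neg (by simp)]
        rw [if_pos ⟨by simp, hG⟩]
        simp
      · rw [hgo v hv]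
        have : (v ∈ w :: c ∧ (d.getD v []).getLast? ≠ some s)
            ↔ (v ∈ c ∧ (d.getD v []).getLast? ≠ some s) := by
          simp [List.mem_cons, hv]
        rw [if_congr this rfl rfl]
    · rw [Ne, not_not] at hG
      have hne : d.getD w [] ≠ [] := by
        intro h; rw [h] at hG; simp at hG
      rw [if_neg (by simp [hne, hG])]
      rw [ih d H v]
      by_cases hv : v = w
      · subst hv
        rw [if_neg (by simp [hG]), if_neg (by simp [hG])]
      · have : (v ∈ w :: c ∧ (d.getD v []).getLast? ≠ some s)
            ↔ (v ∈ c ∧ (d.getD v []).getLast? ≠ some s) := by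
          simp [List.mem_cons, hv]
        rw [if_congr this rfl rfl]

-- the whole index-building loop, over the enumerated cycles
lemma outerB (cl : List (List Int)) :
    ∀ (s : Int) (d : PySem.Dict Int (List Int)),
      (∀ v x, x ∈ d.getD v [] → x < s) →
      ∀ v, ((PySem.List.enumerate cl s).foldl
            (fun d p => p.2.foldl (fun d v =>
              if d.getD v [] = [] ∨ (d.getD v []).getLast? ≠ some p.1
              then d.insert v (d.getD v [] ++ [p.1]) else d) d) d).getD v []
        = d.getD v []
          ++ ((PySem.List.enumerate cl s).filter (fun p => p.2.contains v)).map (fun p => p.1) := by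
  induction cl with
  | nil => intro s d H v; simp [PySem.List.enumerate]
  | cons c cl ih =>
    intro s d H v
    rw [PySem.List.enumerate_cons]
    simp only [List.foldl_cons, List.filter_cons]
    have Hd : ∀ u, (((d.getD u []).getLast? = some s) ∨ ∀ x ∈ d.getD u [], x ≠ s) :=
      fun u => Or.inr (fun x hx => by have := H u x hx; omega)
    have h1 := innerB s c d Hd
    set d₁ := c.foldl (fun d v =>
      if d.getD v [] = [] ∨ (d.getD v []).getLast? ≠ some s
      then d.insert v (d.getD v [] ++ [s]) else d) d with hd₁
    have H₁ : ∀ u x, x ∈ d₁.getD u [] → x < s + 1 := by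
      intro u x hx
      rw [h1 u] at hx
      rcases List.mem_append.mp hx with h | h
      · have := H u x h; omega
      · split at h
        · simp at h; omega
        · simp at h
    have hrec := ih (s + 1) d₁ H₁ v
    rw [hrec, h1 v]
    have hlast : (d.getD v []).getLast? ≠ some s := by
      intro heq
      have hmem : s ∈ d.getD v [] := List.mem_of_getLast? heq
      have := H v s hmem; omega
    by_cases hv : v ∈ c
    · have hcv : (c.contains v : Bool) = true := by
        simpa using hv
      rw [if_pos ⟨hv, hlast⟩, if_pos hcv]
      simp
    · have hcv : ¬ ((c.contains v : Bool) = true) := by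
        simpa using hv
      rw [if_neg (by tauto), if_neg hcv]
      simp

lemma pvCgIndex_getD (cl : List (List Int)) (v : Int) :
    (pvCgIndex cl).getD v [] = idsOf cl v := by
  have h := outerB cl 0 PySem.Dict.empty
    (by intro u x hx; simp [PySem.Dict.getD_empty] at hx) v
  simpa [pvCgIndex, idsOf, PySem.Dict.getD_empty] using h

lemma nodup_innerB (s : Int) (c : List Int) :
    ∀ d : PySem.Dict Int (List Int), d.keys.Nodup →
      (c.foldl (fun d v =>
          if d.getD v [] = [] ∨ (d.getD v []).getLast? ≠ some s
          then d.insert v (d.getD v [] ++ [s]) else d) d).keys.Nodup := by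
  induction c with
  | nil => intro d h; exact h
  | cons w c ih =>
    intro d h
    simp only [List.foldl_cons]
    apply ih
    split_ifs
    · exact PySem.Dict.nodup_keys_insert _ _ _ h
    · exact h

lemma nodup_pvCgIndex (cl : List (List Int)) : (pvCgIndex cl).keys.Nodup := by
  have main : ∀ (L : List (Int × List Int)) (d : PySem.Dict Int (List Int)), d.keys.Nodup →
      (L.foldl (fun d p => p.2.foldl (fun d v =>
        if d.getD v [] = [] ∨ (d.getD v []).getLast? ≠ some p.1
        then d.insert v (d.getD v [] ++ [p.1]) else d) d) d).keys.Nodup := by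
    intro L
    induction L with
    | nil => intro d h; exact h
    | cons p L ih =>
      intro d h
      simp only [List.foldl_cons]
      exact ih _ (nodup_innerB p.1 p.2 d h)
  exact main (PySem.List.enumerate cl 0) PySem.Dict.empty (by simp [PySem.Dict.keys_empty])

lemma mem_idsOf (cl : List (List Int)) (v a : Int) :
    a ∈ idsOf cl v ↔ ∃ k : Nat, k < cl.length ∧ a = (k : Int) ∧ v ∈ cl.getD k [] := by
  simp only [idsOf, List.mem_map, List.mem_filter, PySem.List.mem_enumerate_iff]
  constructor
  · rintro ⟨⟨i, c⟩, ⟨⟨k, hk, heq⟩, hcont⟩, rfl⟩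
    rw [Prod.mk.injEq] at heq
    obtain ⟨rfl, rfl⟩ := heq
    refine ⟨k, hk, by omega, ?_⟩
    rw [getD_lt_eq cl k hk []]
    simpa using hcont
  · rintro ⟨k, hk, rfl, hv⟩
    refine ⟨((k : Int), cl.getD k []), ⟨⟨k, hk, by rw [getD_lt_eq cl k hk []]; norm_num⟩, ?_⟩, rfl⟩
    simpa using hv

lemma pairwise_idsOf (cl : List (List Int)) (v : Int) : (idsOf cl v).Pairwise (· < ·) := by
  unfold idsOf
  exact ((PySem.List.pairwise_lt_enumerate cl 0).filter _).map _ (fun a b h => h)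

lemma mem_pvCgPairs (cl : List (List Int)) (x : Int × Int) :
    x ∈ pvCgPairs cl ↔ ∃ ids ∈ (pvCgIndex cl).values, ∃ a b : Nat,
      a < b ∧ b < ids.length ∧ x = (ids.getD a 0, ids.getD b 0) := by
  unfold pvCgPairs
  have hstep1 : (pvCgIndex cl).values.foldl
      (fun s ids => (List.range ids.length).foldl (fun s a =>
        (List.range' (a+1) (ids.length - (a+1))).foldl
          (fun s b => PySem.Set.add s (ids.getD a 0, ids.getD b 0)) s) s)
      PySem.Set.empty
    = (pvCgIndex cl).values.foldl
      (fun s ids => ((List.range ids.length).flatMap (fun a =>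
          (List.range' (a+1) (ids.length - (a+1))).map (fun b => (a, b)))).foldl
        (fun s pr => PySem.Set.add s (ids.getD pr.1 0, ids.getD pr.2 0)) s)
      PySem.Set.empty :=
    PySem.List.foldl_congr_mem _ _ _ _ (fun acc ids _ => foldl_foldl_flatMap _ _ _ _)
  rw [hstep1, foldl_foldl_flatMap, PySem.Set.mem_foldl_add]
  simp only [PySem.Set.empty, List.not_mem_nil, false_or]
  constructor
  · rintro ⟨q, hq, rfl⟩
    rcases List.mem_flatMap.mp hq with ⟨ids, hids, hq2⟩
    rcases List.mem_map.mp hq2 with ⟨pr, hpr, rfl⟩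
    have h := (mem_pairlist ids.length pr).mp hpr
    exact ⟨ids, hids, pr.1, pr.2, h.1, h.2, rfl⟩
  · rintro ⟨ids, hids, a, b, hab, hb, rfl⟩
    refine ⟨(ids, (a, b)), List.mem_flatMap.mpr ⟨ids, hids, List.mem_map.mpr ⟨(a, b),
      (mem_pairlist ids.length (a, b)).mpr ⟨hab, hb⟩, rfl⟩⟩, rfl⟩

lemma mem_pvCgPairs_iff (cl : List (List Int)) (x y : Int) :
    (x, y) ∈ pvCgPairs cl ↔ ∃ p q : Nat, p < q ∧ q < cl.length ∧
      x = (p : Int) ∧ y = (q : Int) ∧ shareB cl p q = true := by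
  rw [mem_pvCgPairs]
  constructor
  · rintro ⟨ids, hids, a, b, hab, hb, heq⟩
    rw [Prod.mk.injEq] at heq
    obtain ⟨rfl, rfl⟩ := heq
    rw [PySem.Dict.values_eq_map_keys _ (nodup_pvCgIndex cl) []] at hids
    rcases List.mem_map.mp hids with ⟨v, hvk, rfl⟩
    rw [pvCgIndex_getD] at *
    have hmema : (idsOf cl v).getD a 0 ∈ idsOf cl v := getD_mem_of_lt _ a (by omega) 0
    have hmemb : (idsOf cl v).getD b 0 ∈ idsOf cl v := getD_mem_of_lt _ b (by omega) 0
    rcases (mem_idsOf cl v _).mp hmema with ⟨p, hp, hpe, hvp⟩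
    rcases (mem_idsOf cl v _).mp hmemb with ⟨q, hq, hqe, hvq⟩
    have hlt : (idsOf cl v).getD a 0 < (idsOf cl v).getD b 0 := by
      rw [getD_lt_eq _ a (by omega) 0, getD_lt_eq _ b (by omega) 0]
      exact List.pairwise_iff_getElem.mp (pairwise_idsOf cl v) a b (by omega) (by omega) hab
    refine ⟨p, q, ?_, hq, hpe, hqe, ?_⟩
    · rw [hpe, hqe] at hlt; exact_mod_cast hlt
    · rw [shareB_iff]; exact ⟨v, hvp, hvq⟩
  · rintro ⟨p, q, hpq, hq, rfl, rfl, hsh⟩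
    rcases (shareB_iff cl p q).mp hsh with ⟨v, hvp, hvq⟩
    have hmp : ((p : Int)) ∈ idsOf cl v := (mem_idsOf cl v _).mpr ⟨p, by omega, rfl, hvp⟩
    have hmq : ((q : Int)) ∈ idsOf cl v := (mem_idsOf cl v _).mpr ⟨q, hq, rfl, hvq⟩
    have hcont : (pvCgIndex cl).contains v = true := by
      by_contra hc
      have : (pvCgIndex cl).getD v [] = [] :=
        PySem.Dict.getD_of_not_contains _ _ (by simpa using hc)
      rw [pvCgIndex_getD] at this
      rw [this] at hmp
      simp at hmp
    have hvk : v ∈ (pvCgIndex cl).keys := (PySem.Dict.contains_iff_mem_keys _ _).mp hcont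
    have hids : idsOf cl v ∈ (pvCgIndex cl).values := by
      rw [PySem.Dict.values_eq_map_keys _ (nodup_pvCgIndex cl) []]
      exact List.mem_map.mpr ⟨v, hvk, pvCgIndex_getD cl v⟩
    rcases List.mem_iff_getElem.mp hmp with ⟨a, hA, hae⟩
    rcases List.mem_iff_getElem.mp hmq with ⟨b, hB, hbe⟩
    have hpw := List.pairwise_iff_getElem.mp (pairwise_idsOf cl v)
    have hab : a < b := by
      rcases Nat.lt_trichotomy a b with h | h | h
      · exact h
      · exfalso; subst h; rw [hae] at hbe; simp at hbe; omega
      · exfalso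
        have := hpw b a (by omega) (by omega) h
        rw [hae, hbe] at this
        have : (q : Int) < (p : Int) := this
        omega
    exact ⟨idsOf cl v, hids, a, b, hab, hB, by
      rw [Prod.mk.injEq, getD_lt_eq _ a (by omega) 0, getD_lt_eq _ b (by omega) 0, hae, hbe]
      exact ⟨rfl, rfl⟩⟩

-- B computes the target matrix
lemma B_eq_tgt (cycles : List (List Int)) : conflict_graph_alt cycles = (tgt cycles, cycles) := by
  simp only [conflict_graph_alt, tgt, Prod.mk.injEq, and_true]
  apply List.map_congr_left
  intro i hi
  apply List.map_congr_left
  intro j hj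
  have hi' := List.mem_range.mp hi
  have hj' := List.mem_range.mp hj
  have hiff : ((pvCgPairs cycles).contains ((i : Int), (j : Int))
        || (pvCgPairs cycles).contains ((j : Int), (i : Int))) = true
      ↔ (i ≠ j ∧ shareB cycles i j = true) := by
    rw [Bool.or_eq_true, PySem.Set.contains_iff, PySem.Set.contains_iff,
      mem_pvCgPairs_iff, mem_pvCgPairs_iff]
    constructor
    · rintro (⟨p, q, hpq, hq, hip, hjq, hsh⟩ | ⟨p, q, hpq, hq, hjp, hiq, hsh⟩)
      · have : i = p ∧ j = q := ⟨by exact_mod_cast hip, by exact_mod_cast hjq⟩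
        obtain ⟨rfl, rfl⟩ := this
        exact ⟨by omega, hsh⟩
      · have : j = p ∧ i = q := ⟨by exact_mod_cast hjp, by exact_mod_cast hiq⟩
        obtain ⟨rfl, rfl⟩ := this
        exact ⟨by omega, by rw [shareB_symm]; exact hsh⟩
    · rintro ⟨hne, hsh⟩
      rcases Nat.lt_or_ge i j with hlt | hge
      · exact Or.inl ⟨i, j, hlt, hj', rfl, rfl, hsh⟩
      · exact Or.inr ⟨j, i, by omega, hi', rfl, rfl, by rw [shareB_symm]; exact hsh⟩
  exact if_congr hiff rfl rfl

-- ===== VERDICT (by name: the statement is the Claim_ definition above) =====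
theorem conflict_graph_spec : Claim_equal_conflict_graph := by
  intro cycles _
  show conflict_graph cycles = conflict_graph_alt cycles
  rw [A_eq_tgt, B_eq_tgt]
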